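-- pv_equiv track=rewrite | github.com/rdkit/mmpdb | mmpdblib/cli/fragdb_split.py | subset_by_max_pairs
-- ===== SOURCE A (Python) =====
-- def get_estimated_num_pairs(n):
--     # +1 to include the possibility of matching to a hydrogen SMILES
--     # and to keep from dumping everything into a single file.
--     return n*(n-1)//2 + 1
--
-- def _largest_subset_sort_key(pair):
--     tot_num_pairs, subset = pair
--     return (-tot_num_pairs, len(subset), subset)
--
-- def subset_by_max_pairs(constant_counts, max_pairs):
--     assert max_pairs > 0, max_pairs
--     import heapq
--     heap = [(0, [])]
--
--     for count, constant in constant_counts: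
--         num_pairs = get_estimated_num_pairs(count)
--
--         tot_num_pairs, subset = heap[0]
--
--         if (not tot_num_pairs) or (tot_num_pairs + num_pairs <= max_pairs):
--             # Add if the smallest is empty, or if there's room.
--             subset.append(constant)
--             heapq.heapreplace(heap, (tot_num_pairs + num_pairs, subset))
--         else:
--             # Doesn't fit into the smallest available subset.
--             # Need a new one.
--             # (If num_pairs > max_pairs could append to a special 'full' list.)
--             heapq.heappush(heap, (num_pairs, [constant]))
--
--     heap.sort(key = _largest_subset_sort_key)
--     return [subset for (_, subset) in heap]
-- ===== SOURCE B (Python) =====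
-- def subset_by_max_pairs(constant_counts, max_pairs):
--     # Simpler re-implementation: no heap; keep a plain list of (tot_num_pairs, subset)
--     # entries and pick the minimum by a linear scan each round.
--     assert max_pairs > 0, max_pairs
--     entries = [(0, [])]
--     for count, constant in constant_counts:
--         num_pairs = count * (count - 1) // 2 + 1
--         i, (tot, subset) = min(enumerate(entries), key=lambda e: e[1])
--         if tot == 0 or tot + num_pairs <= max_pairs:
--             entries[i] = (tot + num_pairs, subset + [constant])
--         else:
--             entries.append((num_pairs, [constant]))
--     entries.sort(key=lambda e: (-e[0], len(e[1]), e[1]))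
--     return [subset for _, subset in entries]
-- ===== Notes on version B (the rewrite author's own statement) =====
-- stated objective: simpler
-- what changed: Replaced the heapq binary heap (heappush/heapreplace with sift operations) by a plain list of (total, subset) entries whose minimum is selected each round by a linear scan with min(enumerate(entries)); tuple comparison makes the scan pick exactly the value heap[0] holds.
import Mathlib
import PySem

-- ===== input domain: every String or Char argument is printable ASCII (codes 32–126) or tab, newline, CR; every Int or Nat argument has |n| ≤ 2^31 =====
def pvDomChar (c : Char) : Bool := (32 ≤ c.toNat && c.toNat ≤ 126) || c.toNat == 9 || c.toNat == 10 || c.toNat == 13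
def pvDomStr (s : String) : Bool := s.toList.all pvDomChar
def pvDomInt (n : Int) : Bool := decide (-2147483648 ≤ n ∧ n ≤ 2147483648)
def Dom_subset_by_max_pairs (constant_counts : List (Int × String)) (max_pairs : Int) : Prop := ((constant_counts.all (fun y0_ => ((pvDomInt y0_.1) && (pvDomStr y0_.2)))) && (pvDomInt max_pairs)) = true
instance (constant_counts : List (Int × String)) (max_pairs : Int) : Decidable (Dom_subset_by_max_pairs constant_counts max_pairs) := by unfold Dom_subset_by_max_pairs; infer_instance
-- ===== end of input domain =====

-- B replaces A's heapq binary heap by a plain list scanned with min(); same return value, simpler code.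
-- (A also mutates the heap entries' subset lists in place; both return fresh structure, equivalence is about the return value.)

-- ===== PORT A =====
-- Python '<' on a (tot_num_pairs, subset) tuple: ints first, then the string lists lexicographically (exact for any strings).
def pvEntryLt (a b : Int × List String) : Bool := decide (toLex a < toLex b)

-- get_estimated_num_pairs(n) = n*(n-1)//2 + 1
def get_estimated_num_pairs (n : Int) : Int := PySem.Int.floordiv (n * (n - 1)) 2 + 1

-- _largest_subset_sort_key(pair) = (-tot_num_pairs, len(subset), subset); Python tuple order = the lexicographic order ×ₗ.
def pvSortKey (e : Int × List String) : Int ×ₗ ℕ ×ₗ List String := toLex (-e.1, toLex (e.2.length, e.2))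

-- heapq._siftdown(heap, startpos, pos): bubble `newitem` (the value destined for index pos) up, step for step.
-- `fuel` only bounds the loop (pos strictly decreases, so pos + 1 steps always suffice; callers pass enough).
def pvSiftdownGo : Nat → List (Int × List String) → Int × List String → Nat → Nat → List (Int × List String)
  | 0, heap, newitem, _, pos => heap.set pos newitem
  | fuel + 1, heap, newitem, startpos, pos =>
    if startpos < pos then
      let parentpos := (pos - 1) / 2
      let parent := heap.getD parentpos (0, [])
      if pvEntryLt newitem parent then
        pvSiftdownGo fuel (heap.set pos parent) newitem startpos parentpos
      else heap.set pos newitem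
    else heap.set pos newitem

-- heapq._siftup(heap, pos): move the hole at pos down to a leaf along smaller children, then sift the new item up.
-- `fuel` only bounds the loop (pos strictly increases below len(heap), so len(heap) steps always suffice).
def pvSiftupGo : Nat → List (Int × List String) → Int × List String → Nat → Nat → List (Int × List String)
  | 0, heap, _, _, _ => heap
  | fuel + 1, heap, newitem, startpos, pos =>
    let endpos := heap.length
    let childpos := 2 * pos + 1
    if childpos < endpos then
      let childpos' := if childpos + 1 < endpos && !pvEntryLt (heap.getD childpos (0, [])) (heap.getD (childpos + 1) (0, [])) then childpos + 1 else childpos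
      pvSiftupGo fuel (heap.set pos (heap.getD childpos' (0, []))) newitem startpos childpos'
    else pvSiftdownGo (pos + 1) (heap.set pos newitem) newitem startpos pos

-- heapq.heappush(heap, item) = heap.append(item); _siftdown(heap, 0, len(heap)-1)
def pvHeappush (heap : List (Int × List String)) (item : Int × List String) : List (Int × List String) :=
  pvSiftdownGo (heap.length + 1) (heap ++ [item]) item 0 heap.length

-- heapq.heapreplace(heap, item): heap[0] = item; _siftup(heap, 0)  (the popped value is discarded by A)
def pvHeapreplace (heap : List (Int × List String)) (item : Int × List String) : List (Int × List String) :=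
  pvSiftupGo heap.length (heap.set 0 item) item 0 0

def subset_by_max_pairs (constant_counts : List (Int × String)) (max_pairs : Int) : List (List String) :=
  -- assert max_pairs > 0 : inputs with max_pairs ≤ 0 raise AssertionError and are excluded by Pre_.
  let heap := constant_counts.foldl (fun heap p =>
      let num_pairs := get_estimated_num_pairs p.1
      let e := heap.getD 0 (0, [])   -- heap[0]; the heap is provably never empty
      if e.1 == 0 || decide (e.1 + num_pairs ≤ max_pairs) then
        pvHeapreplace heap (e.1 + num_pairs, e.2 ++ [p.2])
      else
        pvHeappush heap (num_pairs, [p.2]))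
    [((0 : Int), ([] : List String))]
  (PySem.List.sorted heap pvSortKey false).map (fun e => e.2)

-- ===== PORT B =====
def subset_by_max_pairs_alt (constant_counts : List (Int × String)) (max_pairs : Int) : List (List String) :=
  -- assert max_pairs > 0 : same precondition as A.
  let entries := constant_counts.foldl (fun entries p =>
      let num_pairs := PySem.Int.floordiv (p.1 * (p.1 - 1)) 2 + 1
      -- i, (tot, subset) = min(enumerate(entries), key=lambda e: e[1])  — first minimum, Python tuple order
      match PySem.List.min? (PySem.List.enumerate entries) (fun q => toLex q.2) with
      | none => entries   -- unreachable: entries is never empty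
      | some (i, (tot, subset)) =>
        if tot == 0 || decide (tot + num_pairs ≤ max_pairs) then
          entries.set i.toNat (tot + num_pairs, subset ++ [p.2])   -- i comes from enumerate, so i ≥ 0: toNat is exact
        else
          entries ++ [(num_pairs, [p.2])])
    [((0 : Int), ([] : List String))]
  (PySem.List.sorted entries pvSortKey false).map (fun e => e.2)

-- ===== PRECONDITION & SPEC =====
-- Pre_: the Python asserts max_pairs > 0 (AssertionError otherwise).
def Pre_subset_by_max_pairs (constant_counts : List (Int × String)) (max_pairs : Int) : Prop := 0 < max_pairs
instance (constant_counts : List (Int × String)) (max_pairs : Int) : Decidable (Pre_subset_by_max_pairs constant_counts max_pairs) := by unfold Pre_subset_by_max_pairs; infer_instance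
def pvWitness_subset_by_max_pairs : (List (Int × String)) × Int := ([(2, "a"), (3, "b")], 4)

def Spec_subset_by_max_pairs (constant_counts : List (Int × String)) (max_pairs : Int) (out : List (List String)) : Prop := out = subset_by_max_pairs_alt constant_counts max_pairs
instance (constant_counts : List (Int × String)) (max_pairs : Int) (out : List (List String)) : Decidable (Spec_subset_by_max_pairs constant_counts max_pairs out) := by unfold Spec_subset_by_max_pairs; infer_instance

-- ===== CLAIM (what is proved, stated in full; the proofs are below) =====
def Claim_equal_subset_by_max_pairs : Prop := ∀ (constant_counts : List (Int × String)) (max_pairs : Int), Dom_subset_by_max_pairs constant_counts max_pairs → Pre_subset_by_max_pairs constant_counts max_pairs → Spec_subset_by_max_pairs constant_counts max_pairs (subset_by_max_pairs constant_counts max_pairs)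


-- ===== LEMMAS AND PROOFS =====

-- Abbreviations used only by the proofs.
def pvD : Int × List String := (0, [])
def pvGe (l : List (Int × List String)) (i : Nat) : Int × List String := l.getD i pvD
def pvLe (a b : Int × List String) : Prop := toLex a ≤ toLex b
-- binary-heap property, parent (c-1)/2 ≤ child c
def pvIsHeap (l : List (Int × List String)) : Prop :=
  ∀ c, c < l.length → 0 < c → pvLe (pvGe l ((c - 1) / 2)) (pvGe l c)

-- the two loop bodies, as top-level functions (definitionally equal to the ports' closures)
def pvStepA (mp : Int) (heap : List (Int × List String)) (p : Int × String) : List (Int × List String) :=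
  let num_pairs := get_estimated_num_pairs p.1
  let e := heap.getD 0 (0, [])
  if e.1 == 0 || decide (e.1 + num_pairs ≤ mp) then
    pvHeapreplace heap (e.1 + num_pairs, e.2 ++ [p.2])
  else
    pvHeappush heap (num_pairs, [p.2])

def pvStepB (mp : Int) (entries : List (Int × List String)) (p : Int × String) : List (Int × List String) :=
  let num_pairs := PySem.Int.floordiv (p.1 * (p.1 - 1)) 2 + 1
  match PySem.List.min? (PySem.List.enumerate entries) (fun q => toLex q.2) with
  | none => entries
  | some (i, (tot, subset)) =>
    if tot == 0 || decide (tot + num_pairs ≤ mp) then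
      entries.set i.toNat (tot + num_pairs, subset ++ [p.2])
    else
      entries ++ [(num_pairs, [p.2])]

lemma pv_unfold_A (cc : List (Int × String)) (mp : Int) :
    subset_by_max_pairs cc mp
      = (PySem.List.sorted (cc.foldl (pvStepA mp) [((0:Int),([]:List String))]) pvSortKey false).map (fun e => e.2) := rfl

lemma pv_unfold_B (cc : List (Int × String)) (mp : Int) :
    subset_by_max_pairs_alt cc mp
      = (PySem.List.sorted (cc.foldl (pvStepB mp) [((0:Int),([]:List String))]) pvSortKey false).map (fun e => e.2) := rfl

-- order facts
lemma pvLt_iff (a b : Int × List String) : pvEntryLt a b = true ↔ toLex a < toLex b := by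
  simp [pvEntryLt]

lemma pvLe_of_lt {a b : Int × List String} (h : pvEntryLt a b = true) : pvLe a b :=
  le_of_lt ((pvLt_iff a b).1 h)

lemma pvLe_of_not_lt {a b : Int × List String} (h : ¬ pvEntryLt a b = true) : pvLe b a := by
  rw [pvLt_iff] at h; exact not_lt.1 h

lemma pvLe_refl (a : Int × List String) : pvLe a a := le_refl _

lemma pvLe_trans {a b c : Int × List String} (h1 : pvLe a b) (h2 : pvLe b c) : pvLe a c := le_trans h1 h2

lemma pvLe_antisymm {a b : Int × List String} (h1 : pvLe a b) (h2 : pvLe b a) : a = b :=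
  toLex_inj.1 (le_antisymm h1 h2)

-- getD facts
lemma pvGe_eq {l : List (Int × List String)} {i : Nat} (h : i < l.length) : pvGe l i = l[i] := by
  simp [pvGe, List.getD_eq_getElem?_getD, List.getElem?_eq_getElem h]

lemma pvGe_set_self {l : List (Int × List String)} {i : Nat} {x} (h : i < l.length) :
    pvGe (l.set i x) i = x := by
  simp [pvGe, List.getD_eq_getElem?_getD, h]

lemma pvGe_set_ne {l : List (Int × List String)} {i j : Nat} {x} (h : i ≠ j) :
    pvGe (l.set i x) j = pvGe l j := by
  simp [pvGe, List.getD_eq_getElem?_getD, List.getElem?_set_ne h]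

-- permutation facts
lemma pv_perm_set {l : List (Int × List String)} {i : Nat} {x} (h : i < l.length) :
    (l.set i x).Perm (x :: l.eraseIdx i) := by
  rw [List.set_eq_take_append_cons_drop, if_pos h, List.eraseIdx_eq_take_drop_succ]
  exact List.perm_middle

lemma pv_perm_ge_eraseIdx {l : List (Int × List String)} {i : Nat} (h : i < l.length) :
    l.Perm (pvGe l i :: l.eraseIdx i) := by
  conv_lhs => rw [← List.take_append_drop i l, ← List.getElem_cons_drop h]
  rw [List.eraseIdx_eq_take_drop_succ, pvGe_eq h]
  exact List.perm_middle

lemma pv_set_set_swap_perm :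
    ∀ (l : List (Int × List String)) (i j : Nat) (x), i < l.length → j < l.length → i ≠ j →
    ((l.set i (pvGe l j)).set j x).Perm (l.set i x) := by
  intro l
  induction l with
  | nil => intro i j x hi; simp at hi
  | cons a t ih =>
    intro i j x hi hj hij
    match i, j with
    | 0, 0 => exact absurd rfl hij
    | 0, k+1 =>
      simp only [List.set_cons_zero, List.set_cons_succ]
      have hk : k < t.length := by simpa using hj
      have h1 : pvGe (a :: t) (k+1) = pvGe t k := by simp [pvGe]
      rw [h1]
      exact ((pv_perm_set hk).cons _).trans ((List.Perm.swap x (pvGe t k) _).trans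
        (((pv_perm_ge_eraseIdx hk).symm).cons _))
    | m+1, 0 =>
      simp only [List.set_cons_succ, List.set_cons_zero]
      have hm : m < t.length := by simpa using hi
      have h1 : pvGe (a :: t) 0 = a := by simp [pvGe]
      rw [h1]
      exact ((pv_perm_set hm).cons _).trans ((List.Perm.swap a x _).trans
        (((pv_perm_set hm).symm).cons _))
    | m+1, k+1 =>
      simp only [List.set_cons_succ]
      have h1 : pvGe (a :: t) (k+1) = pvGe t k := by simp [pvGe]
      rw [h1]
      exact (ih m k x (by simpa using hi) (by simpa using hj) (by omega)).cons _

lemma pv_siftdownGo_perm :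
    ∀ (fuel pos : Nat) (l : List (Int × List String)) (item : Int × List String) (s : Nat),
      pos < fuel → pos < l.length →
    (pvSiftdownGo fuel l item s pos).Perm (l.set pos item) := by
  intro fuel
  induction fuel with
  | zero => intro pos l item s hf hpos; omega
  | succ n ih =>
    intro pos l item s hf hpos
    rw [pvSiftdownGo]
    dsimp only
    split
    · next h =>
      split
      · next hlt =>
        have hpp : (pos - 1) / 2 < pos := by omega
        have hlen : (pos - 1) / 2 < (l.set pos (l.getD ((pos - 1) / 2) (0, []))).length := by
          simpa using lt_trans hpp hpos
        have h2 := ih ((pos - 1) / 2) (l.set pos (l.getD ((pos - 1) / 2) (0, []))) item s (by omega) hlen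
        refine h2.trans ?_
        have := pv_set_set_swap_perm l pos ((pos - 1) / 2) item hpos (by omega) (by omega)
        simpa [pvGe, pvD] using this
      · exact List.Perm.refl _
    · exact List.Perm.refl _

lemma pv_siftupGo_perm :
    ∀ (fuel : Nat) (l : List (Int × List String)) (item : Int × List String) (s pos : Nat),
      l.length ≤ pos + fuel → pos < l.length →
    (pvSiftupGo fuel l item s pos).Perm (l.set pos item) := by
  intro fuel
  induction fuel with
  | zero => intro l item s pos hf hpos; omega
  | succ n ih =>
    intro l item s pos hf hpos
    rw [pvSiftupGo]
    dsimp only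
    split
    · next h =>
      set cp := if 2 * pos + 1 + 1 < l.length && !pvEntryLt (l.getD (2 * pos + 1) (0, [])) (l.getD (2 * pos + 1 + 1) (0, [])) then 2 * pos + 1 + 1 else 2 * pos + 1 with hcp
      have hcb : pos < cp ∧ cp < l.length := by
        rw [hcp]; split
        · next hc => simp only [Bool.and_eq_true, decide_eq_true_eq] at hc; omega
        · omega
      have h2 := ih (l.set pos (l.getD cp (0, []))) item s cp (by simp; omega) (by simp; omega)
      refine h2.trans ?_
      have := pv_set_set_swap_perm l pos cp item hpos hcb.2 (by omega)
      simpa [pvGe, pvD] using this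
    · next h =>
      have h3 := pv_siftdownGo_perm (pos + 1) pos (l.set pos item) item s (by omega) (by simpa using hpos)
      simpa [List.set_set] using h3

-- value at an index of an appended singleton, below the old length
lemma pvGe_append_lt {l : List (Int × List String)} {x} {j : Nat} (h : j < l.length) :
    pvGe (l ++ [x]) j = pvGe l j := by
  simp [pvGe, List.getD_eq_getElem?_getD, List.getElem?_append_left h]

-- bubbling `item` up from `pos` restores the heap property
lemma pv_set_isHeap_end {l : List (Int × List String)} {item} {pos : Nat} (hpos : pos < l.length)
    (h1 : ∀ c, c < l.length → 0 < c → c ≠ pos → pvLe (pvGe l ((c - 1) / 2)) (pvGe l c))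
    (h2 : ∀ c, c < l.length → 0 < c → (c - 1) / 2 = pos → pvLe item (pvGe l c))
    (hpar : 0 < pos → pvLe (pvGe l ((pos - 1) / 2)) item) :
    pvIsHeap (l.set pos item) := by
  intro c hc hc0
  have hc' : c < l.length := by simpa using hc
  by_cases hcp : c = pos
  · subst hcp
    rw [pvGe_set_self hpos, pvGe_set_ne (by omega)]
    exact hpar hc0
  · rw [pvGe_set_ne (fun h => hcp h.symm)]
    by_cases hpp : (c - 1) / 2 = pos
    · rw [hpp, pvGe_set_self hpos]; exact h2 c hc' hc0 hpp
    · rw [pvGe_set_ne (fun h => hpp h.symm)]; exact h1 c hc' hc0 hcp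

lemma pv_siftdownGo_isHeap :
    ∀ (fuel pos : Nat) (l : List (Int × List String)) (item : Int × List String), pos < fuel → pos < l.length →
    (∀ c, c < l.length → 0 < c → c ≠ pos → pvLe (pvGe l ((c - 1) / 2)) (pvGe l c)) →
    (∀ c, c < l.length → 0 < c → (c - 1) / 2 = pos → pvLe item (pvGe l c)) →
    (0 < pos → ∀ c, c < l.length → 0 < c → (c - 1) / 2 = pos → pvLe (pvGe l ((pos - 1) / 2)) (pvGe l c)) →
    pvIsHeap (pvSiftdownGo fuel l item 0 pos) := by
  intro fuel
  induction fuel with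
  | zero => intro pos l item hf; omega
  | succ n ih =>
    intro pos l item hf hpos h1 h2 h3
    rw [pvSiftdownGo]
    dsimp only
    split
    · next hs =>
      have heq : (l.getD ((pos - 1) / 2) (0, []) : Int × List String) = pvGe l ((pos - 1) / 2) := rfl
      split
      · next hlt =>
        rw [heq]
        have hilen : (pos - 1) / 2 < (l.set pos (pvGe l ((pos - 1) / 2))).length := by
          simp; omega
        apply ih ((pos - 1) / 2) _ item (by omega) hilen
        · -- h1'
          intro c hc hc0 hcp
          have hc' : c < l.length := by simpa using hc
          by_cases hcpos : c = pos
          · subst hcpos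
            rw [pvGe_set_self hpos, pvGe_set_ne (by omega : c ≠ (c - 1) / 2)]
            exact pvLe_refl _
          · rw [pvGe_set_ne (fun h => hcpos h.symm)]
            by_cases hq : (c - 1) / 2 = pos
            · rw [hq, pvGe_set_self hpos]
              exact h3 hs c hc' hc0 hq
            · rw [pvGe_set_ne (fun h => hq h.symm)]
              exact h1 c hc' hc0 hcpos
        · -- h2'
          intro c hc hc0 hcp
          have hc' : c < l.length := by simpa using hc
          by_cases hcpos : c = pos
          · subst hcpos
            rw [pvGe_set_self hpos]
            exact pvLe_of_lt hlt
          · rw [pvGe_set_ne (fun h => hcpos h.symm)]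
            have hx := h1 c hc' hc0 hcpos
            rw [hcp] at hx
            exact pvLe_trans (pvLe_of_lt hlt) hx
        · -- h3'
          intro hp0 c hc hc0 hcp
          have hc' : c < l.length := by simpa using hc
          have hglt : ((pos - 1) / 2 - 1) / 2 ≠ pos := by omega
          rw [pvGe_set_ne (fun h => hglt h.symm)]
          have hbase : pvLe (pvGe l (((pos - 1) / 2 - 1) / 2)) (pvGe l ((pos - 1) / 2)) :=
            h1 ((pos - 1) / 2) (by omega) hp0 (by omega)
          by_cases hcpos : c = pos
          · subst hcpos
            rw [pvGe_set_self hpos]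
            exact hbase
          · rw [pvGe_set_ne (fun h => hcpos h.symm)]
            have hx := h1 c hc' hc0 hcpos
            rw [hcp] at hx
            exact pvLe_trans hbase hx
      · next hnlt =>
        exact pv_set_isHeap_end hpos h1 h2 (fun _ => pvLe_of_not_lt hnlt)
    · next hs =>
      have hpos0 : pos = 0 := by omega
      subst hpos0
      exact pv_set_isHeap_end hpos h1 h2 (by omega)

lemma pv_siftupGo_isHeap :
    ∀ (fuel : Nat) (l : List (Int × List String)) (item : Int × List String) (pos : Nat),
      l.length ≤ pos + fuel → pos < l.length →
    (∀ c, c < l.length → 0 < c → c ≠ pos → (c - 1) / 2 ≠ pos → pvLe (pvGe l ((c - 1) / 2)) (pvGe l c)) →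
    (0 < pos → ∀ c, c < l.length → 0 < c → (c - 1) / 2 = pos → pvLe (pvGe l ((pos - 1) / 2)) (pvGe l c)) →
    pvIsHeap (pvSiftupGo fuel l item 0 pos) := by
  intro fuel
  induction fuel with
  | zero => intro l item pos hf hpos; omega
  | succ n ih =>
    intro l item pos hf hpos hiD hiiD
    rw [pvSiftupGo]
    dsimp only
    split
    · next h =>
      set cp := if 2 * pos + 1 + 1 < l.length && !pvEntryLt (l.getD (2 * pos + 1) (0, [])) (l.getD (2 * pos + 1 + 1) (0, [])) then 2 * pos + 1 + 1 else 2 * pos + 1 with hcp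
      have e1 : (l.getD (2 * pos + 1) (0, []) : Int × List String) = pvGe l (2 * pos + 1) := rfl
      have e2 : (l.getD (2 * pos + 1 + 1) (0, []) : Int × List String) = pvGe l (2 * pos + 1 + 1) := rfl
      have hcpb : pos < cp ∧ cp < l.length ∧ (cp - 1) / 2 = pos := by
        rw [hcp]; split
        · next hc => simp only [Bool.and_eq_true, decide_eq_true_eq] at hc; omega
        · omega
      obtain ⟨hpc, hcl, hcpar⟩ := hcpb
      -- the chosen child holds the minimal child value
      have hmin : ∀ o, o < l.length → 0 < o → (o - 1) / 2 = pos → pvLe (pvGe l cp) (pvGe l o) := by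
        intro o ho ho0 hopar
        have ho2 : o = 2 * pos + 1 ∨ o = 2 * pos + 1 + 1 := by omega
        rw [hcp]
        by_cases hcond : (decide (2 * pos + 1 + 1 < l.length) && !pvEntryLt (l.getD (2 * pos + 1) (0, [])) (l.getD (2 * pos + 1 + 1) (0, []))) = true
        · rw [if_pos hcond]
          simp only [Bool.and_eq_true, decide_eq_true_eq, Bool.not_eq_eq_eq_not, Bool.not_true, e1, e2] at hcond
          rcases ho2 with hoe | hoe <;> subst hoe
          · exact pvLe_of_not_lt (by rw [hcond.2]; simp)
          · exact pvLe_refl _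
        · rw [if_neg hcond]
          simp only [Bool.and_eq_true, decide_eq_true_eq, Bool.not_eq_eq_eq_not, Bool.not_true, not_and, e1, e2] at hcond
          rcases ho2 with hoe | hoe <;> subst hoe
          · exact pvLe_refl _
          · have hlt2 : pvEntryLt (pvGe l (2 * pos + 1)) (pvGe l (2 * pos + 1 + 1)) = true := by
              simpa using hcond ho
            exact pvLe_of_lt hlt2
      have heq : (l.getD cp (0, []) : Int × List String) = pvGe l cp := rfl
      rw [heq]
      apply ih (l.set pos (pvGe l cp)) item cp (by simp only [List.length_set]; omega) (by simp only [List.length_set]; omega)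
      · -- iD'
        intro c hc hc0 hccp hqcp
        have hc' : c < l.length := by simpa using hc
        by_cases hcpos : c = pos
        · have h0pos : 0 < pos := hcpos ▸ hc0
          rw [hcpos, pvGe_set_self hpos, pvGe_set_ne (by omega : pos ≠ (pos - 1) / 2)]
          exact hiiD h0pos cp hcl (by omega) hcpar
        · rw [pvGe_set_ne (fun hx => hcpos hx.symm)]
          by_cases hq : (c - 1) / 2 = pos
          · rw [hq, pvGe_set_self hpos]
            exact hmin c hc' hc0 hq
          · rw [pvGe_set_ne (fun hx => hq hx.symm)]
            exact hiD c hc' hc0 hcpos hq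
      · -- iiD'
        intro hcp0 c hc hc0 hcq
        have hc' : c < l.length := by simpa using hc
        have hcbig : 2 * cp + 1 ≤ c := by omega
        rw [hcpar, pvGe_set_self hpos, pvGe_set_ne (by omega : pos ≠ c)]
        have hx := hiD c hc' hc0 (by omega) (by omega)
        rw [hcq] at hx
        exact hx
    · next h =>
      apply pv_siftdownGo_isHeap (pos + 1) pos (l.set pos item) item (by omega) (by simpa using hpos)
      · intro c hc hc0 hcpos
        have hc' : c < l.length := by simpa using hc
        have hq : (c - 1) / 2 ≠ pos := by omega
        rw [pvGe_set_ne (fun hh => hcpos hh.symm), pvGe_set_ne (fun hh => hq hh.symm)]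
        exact hiD c hc' hc0 hcpos hq
      · intro c hc hc0 hcq
        have hc' : c < l.length := by simpa using hc
        omega
      · intro hp0 c hc hc0 hcq
        have hc' : c < l.length := by simpa using hc
        omega

-- heap operations: permutation + heap property
lemma pvHeappush_perm (l : List (Int × List String)) (item) :
    (pvHeappush l item).Perm (l ++ [item]) := by
  have h := pv_siftdownGo_perm (l.length + 1) l.length (l ++ [item]) item 0 (by omega) (by simp)
  rw [pvHeappush]
  refine h.trans ?_
  rw [List.set_append]
  simp

lemma pvHeappush_isHeap {l : List (Int × List String)} (hh : pvIsHeap l) (item) :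
    pvIsHeap (pvHeappush l item) := by
  apply pv_siftdownGo_isHeap (l.length + 1) l.length (l ++ [item]) item (by omega) (by simp)
  · intro c hc hc0 hcpos
    have hc' : c < l.length := by simp at hc; omega
    rw [pvGe_append_lt hc', pvGe_append_lt (by omega)]
    exact hh c hc' hc0
  · intro c hc hc0 hcq
    simp at hc; omega
  · intro hp0 c hc hc0 hcq
    simp at hc; omega

lemma pvHeapreplace_perm {l : List (Int × List String)} (hne : l ≠ []) (item) :
    (pvHeapreplace l item).Perm (item :: l.eraseIdx 0) := by
  have hl : 0 < l.length := List.length_pos_iff.2 hne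
  have h := pv_siftupGo_perm l.length (l.set 0 item) item 0 0 (by simp) (by simpa using hl)
  rw [pvHeapreplace]
  refine h.trans ?_
  rw [List.set_set]
  exact pv_perm_set hl

lemma pvHeapreplace_isHeap {l : List (Int × List String)} (hne : l ≠ []) (hh : pvIsHeap l) (item) :
    pvIsHeap (pvHeapreplace l item) := by
  have hl : 0 < l.length := List.length_pos_iff.2 hne
  apply pv_siftupGo_isHeap l.length (l.set 0 item) item 0 (by simp) (by simpa using hl)
  · intro c hc hc0 hcpos hq
    have hc' : c < l.length := by simpa using hc
    rw [pvGe_set_ne (fun hh2 => hcpos hh2.symm), pvGe_set_ne (fun hh2 => hq hh2.symm)]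
    exact hh c hc' hc0
  · omega

-- the root of a heap is a minimum
lemma pv_root_min {l : List (Int × List String)} (hh : pvIsHeap l) :
    ∀ j, j < l.length → pvLe (pvGe l 0) (pvGe l j) := by
  intro j
  induction j using Nat.strong_induction_on with
  | _ j ih =>
    intro hj
    rcases Nat.eq_zero_or_pos j with hj0 | hj0
    · subst hj0; exact pvLe_refl _
    · exact pvLe_trans (ih ((j - 1) / 2) (by omega) (by omega)) (hh j hj hj0)

-- B's scan: min(enumerate(entries), key=e[1]) yields an index/value pair with a minimal value
lemma pv_enumerate_min (entries : List (Int × List String)) (hne : entries ≠ []) :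
    ∃ (k : Nat) (hk : k < entries.length),
      PySem.List.min? (PySem.List.enumerate entries) (fun q => toLex q.2) = some ((k : Int), entries[k]) ∧
      ∀ w ∈ entries, pvLe entries[k] w := by
  cases hmin : PySem.List.min? (PySem.List.enumerate entries) (fun q => toLex q.2) with
  | none =>
    exfalso
    have hnil := (PySem.List.min?_eq_none_iff _ _).1 hmin
    cases entries with
    | nil => exact hne rfl
    | cons a t =>
      have hmem : ((0 : Int), a) ∈ PySem.List.enumerate (a :: t) := by
        rw [PySem.List.mem_enumerate_iff]
        exact ⟨0, by simp, by simp⟩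
      rw [hnil] at hmem
      simp at hmem
  | some p =>
    obtain ⟨i, v⟩ := p
    have hm := PySem.List.min?_mem hmin
    rw [PySem.List.mem_enumerate_iff] at hm
    obtain ⟨k, hk, hp⟩ := hm
    have hi : i = (k : Int) := by simpa using congrArg Prod.fst hp
    have hv : v = entries[k] := by simpa using congrArg Prod.snd hp
    refine ⟨k, hk, ?_, ?_⟩
    · rw [hi, hv]
    · intro w hw
      obtain ⟨j, hj, hwj⟩ := List.mem_iff_getElem.1 hw
      have hjmem : ((0 : Int) + (j : Int), entries[j]) ∈ PySem.List.enumerate entries := by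
        rw [PySem.List.mem_enumerate_iff]
        exact ⟨j, hj, rfl⟩
      have hle := PySem.List.min?_isMin hmin _ hjmem
      rw [hwj] at hle
      rw [← hv]
      exact hle

-- one loop iteration preserves the simulation invariant
lemma pv_step (mp : Int) (p : Int × String) (heap entries : List (Int × List String))
    (hperm : heap.Perm entries) (hh : pvIsHeap heap) (hne : entries ≠ []) :
    (pvStepA mp heap p).Perm (pvStepB mp entries p) ∧ pvIsHeap (pvStepA mp heap p) ∧ pvStepB mp entries p ≠ [] := by
  have hlenE : 0 < entries.length := List.length_pos_iff.2 hne
  have hlenH : 0 < heap.length := by rw [hperm.length_eq]; exact hlenE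
  have hhne : heap ≠ [] := List.ne_nil_of_length_pos hlenH
  obtain ⟨k, hk, hmin, hvmin⟩ := pv_enumerate_min entries hne
  have hroot : pvGe heap 0 = entries[k] := by
    apply pvLe_antisymm
    · have hvheap : entries[k] ∈ heap := hperm.mem_iff.2 (List.getElem_mem hk)
      obtain ⟨j, hj, hjv⟩ := List.mem_iff_getElem.1 hvheap
      have hx := pv_root_min hh j hj
      rwa [pvGe_eq hj, hjv] at hx
    · exact hvmin _ (hperm.mem_iff.1 (by rw [pvGe_eq hlenH]; exact List.getElem_mem hlenH))
  rw [pvStepA, pvStepB]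
  rw [hmin]
  have hge : (heap.getD 0 (0, []) : Int × List String) = entries[k] := hroot
  rw [hge]
  dsimp only [Int.toNat_natCast]
  have hnp : get_estimated_num_pairs p.1 = PySem.Int.floordiv (p.1 * (p.1 - 1)) 2 + 1 := rfl
  rw [hnp]
  simp only [List.get_eq_getElem]
  set np := PySem.Int.floordiv (p.1 * (p.1 - 1)) 2 + 1 with hnpdef
  set v := entries[k] with hvdef
  set nw := (v.1 + np, v.2 ++ [p.2]) with hnw
  by_cases hcond : (v.1 == 0 || decide (v.1 + np ≤ mp)) = true
  · rw [if_pos hcond, if_pos hcond]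
    refine ⟨?_, pvHeapreplace_isHeap hhne hh _, List.ne_nil_of_length_pos (by simpa using hlenE)⟩
    have hpA := pvHeapreplace_perm hhne nw
    have hpB := pv_perm_set (x := nw) hk
    have h1 : heap.Perm (v :: heap.eraseIdx 0) := by
      have hx := pv_perm_ge_eraseIdx hlenH
      rwa [hroot] at hx
    have h2 : entries.Perm (v :: entries.eraseIdx k) := by
      have hx := pv_perm_ge_eraseIdx hk
      rwa [pvGe_eq hk] at hx
    have he : (heap.eraseIdx 0).Perm (entries.eraseIdx k) :=
      (h1.symm.trans (hperm.trans h2)).cons_inv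
    exact hpA.trans ((he.cons nw).trans hpB.symm)
  · rw [if_neg hcond, if_neg hcond]
    refine ⟨?_, pvHeappush_isHeap hh _, by simp⟩
    exact (pvHeappush_perm heap _).trans (hperm.append (List.Perm.refl _))

lemma pv_isHeap_single : pvIsHeap [((0 : Int), ([] : List String))] := by
  intro c hc hc0
  simp at hc
  omega

lemma pv_fold (mp : Int) :
    ∀ (cc : List (Int × String)) (heap entries : List (Int × List String)),
      heap.Perm entries → pvIsHeap heap → entries ≠ [] →
      (cc.foldl (pvStepA mp) heap).Perm (cc.foldl (pvStepB mp) entries) := by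
  intro cc
  induction cc with
  | nil => intro heap entries h1 _ _; simpa using h1
  | cons p t ih =>
    intro heap entries h1 h2 h3
    obtain ⟨ha, hb, hc⟩ := pv_step mp p heap entries h1 h2 h3
    exact ih _ _ ha hb hc

lemma pvSortKey_inj : Function.Injective pvSortKey := by
  intro a b h
  obtain ⟨a1, a2⟩ := a
  obtain ⟨b1, b2⟩ := b
  simp only [pvSortKey, toLex_inj, Prod.mk.injEq] at h
  obtain ⟨h1, _, h3⟩ := h
  exact Prod.ext (by omega) h3

-- ===== VERDICT (by name: the statement is the Claim_ definition above) =====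
theorem subset_by_max_pairs_spec : Claim_equal_subset_by_max_pairs := by
  intro cc mp _hdom _hpre
  unfold Spec_subset_by_max_pairs
  rw [pv_unfold_A, pv_unfold_B]
  have hperm := pv_fold mp cc [((0 : Int), ([] : List String))] [((0 : Int), ([] : List String))]
    (List.Perm.refl _) pv_isHeap_single (by simp)
  rw [PySem.List.sorted_eq_sorted_of_perm _ _ pvSortKey pvSortKey_inj hperm]
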